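-- pv_equiv track=rewrite | github.com/shutech2001/bond-experiments | scripts/dro_borrowing_simulation.py | select_focus_methods
-- ===== SOURCE A (Python) =====
-- def select_focus_methods(method_order: list[str]) -> list[str]:
--     preferred = [
--         "Current-only",
--         "Naive pooling",
--         "Fixed lambda=0.50",
--         "Power prior(lambda=0.50)",
--         "Commensurate prior(tau=1.00)",
--         "Robust MAP(epsilon=0.20)",
--         "DRO-opt",
--     ]
--     selected = [m for m in preferred if m in method_order]
--     for m in method_order:
--         if m not in selected and m == "DRO-opt":
--             selected.append(m)
--     return selected
-- ===== SOURCE B (Python) =====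
-- def select_focus_methods(method_order: list[str]) -> list[str]:
--     preferred = [
--         "Current-only",
--         "Naive pooling",
--         "Fixed lambda=0.50",
--         "Power prior(lambda=0.50)",
--         "Commensurate prior(tau=1.00)",
--         "Robust MAP(epsilon=0.20)",
--         "DRO-opt",
--     ]
--     rank = {m: i for i, m in enumerate(preferred)}
--     matches = set(method_order) & rank.keys()
--     return sorted(matches, key=rank.__getitem__)
-- ===== Notes on version B (the rewrite author's own statement) =====
-- stated objective: alternative
-- what changed: Replaces A's scan of the preferred template with membership tests (plus a dead second loop) by building a rank index, intersecting set(method_order) with the index's keys, and sorting the matches by rank.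
import Mathlib
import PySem

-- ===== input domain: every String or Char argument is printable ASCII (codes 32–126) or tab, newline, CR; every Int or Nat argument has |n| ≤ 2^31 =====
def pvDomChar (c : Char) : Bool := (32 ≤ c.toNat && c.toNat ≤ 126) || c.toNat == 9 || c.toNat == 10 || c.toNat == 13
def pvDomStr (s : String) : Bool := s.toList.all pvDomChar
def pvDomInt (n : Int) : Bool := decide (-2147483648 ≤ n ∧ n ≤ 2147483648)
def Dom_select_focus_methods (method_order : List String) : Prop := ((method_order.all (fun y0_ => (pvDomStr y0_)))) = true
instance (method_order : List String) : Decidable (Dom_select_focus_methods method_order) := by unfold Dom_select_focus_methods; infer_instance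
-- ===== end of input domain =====

-- B filters via a rank index over set(method_order) and sorts matches by rank, instead of
-- A's scan of the preferred template with membership tests (objective: alternative).

-- ===== PORT A =====
def select_focus_methods (method_order : List String) : List String :=
  let preferred : List String :=
    ["Current-only", "Naive pooling", "Fixed lambda=0.50", "Power prior(lambda=0.50)",
     "Commensurate prior(tau=1.00)", "Robust MAP(epsilon=0.20)", "DRO-opt"]
  let selected := preferred.filter (fun m => decide (m ∈ method_order))
  method_order.foldl
    (fun selected m =>
      if m ∉ selected ∧ m = "DRO-opt" then selected ++ [m] else selected)
    selected

-- ===== PORT B =====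
def select_focus_methods_alt (method_order : List String) : List String :=
  let preferred : List String :=
    ["Current-only", "Naive pooling", "Fixed lambda=0.50", "Power prior(lambda=0.50)",
     "Commensurate prior(tau=1.00)", "Robust MAP(epsilon=0.20)", "DRO-opt"]
  let rank : PySem.Dict String Int :=
    (PySem.List.enumerate preferred).foldl (fun d p => d.insert p.2 p.1) PySem.Dict.empty
  -- set(method_order) & rank.keys(): the distinct elements of method_order that are keys of rank
  let hits : List String := (PySem.Set.ofList method_order).filter (fun m => (rank.get? m).isSome)
  PySem.List.sorted hits (fun m => rank.getD m 0) false

-- ===== PRECONDITION & SPEC =====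
def Spec_select_focus_methods (method_order : List String) (out : List String) : Prop := out = select_focus_methods_alt method_order
instance (method_order : List String) (out : List String) : Decidable (Spec_select_focus_methods method_order out) := by unfold Spec_select_focus_methods; infer_instance

-- ===== CLAIM (what is proved, stated in full; the proofs are below) =====
def Claim_equal_select_focus_methods : Prop := ∀ (method_order : List String), Dom_select_focus_methods method_order → Spec_select_focus_methods method_order (select_focus_methods method_order)

-- ===== LEMMAS AND PROOFS =====

def pvPref : List String :=
  ["Current-only", "Naive pooling", "Fixed lambda=0.50", "Power prior(lambda=0.50)",
   "Commensurate prior(tau=1.00)", "Robust MAP(epsilon=0.20)", "DRO-opt"]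

def pvRank : PySem.Dict String Int :=
  (PySem.List.enumerate pvPref).foldl (fun d p => d.insert p.2 p.1) PySem.Dict.empty

-- A's second loop never fires: "DRO-opt" is in preferred, so if "DRO-opt" ∈ method_order it is
-- already in selected.
lemma pv_fold_id (mo : List String) (sel : List String)
    (h : "DRO-opt" ∈ sel ∨ "DRO-opt" ∉ mo) :
    mo.foldl (fun selected m =>
      if m ∉ selected ∧ m = "DRO-opt" then selected ++ [m] else selected) sel = sel := by
  induction mo with
  | nil => rfl
  | cons x xs ih =>
      simp only [List.foldl_cons]
      rw [if_neg, ih]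
      · rcases h with h | h
        · exact Or.inl h
        · exact Or.inr fun hx => h (List.mem_cons_of_mem _ hx)
      · rintro ⟨hnot, rfl⟩
        rcases h with h | h
        · exact hnot h
        · exact h (List.mem_cons_self)

lemma pv_rank_isSome (m : String) : (pvRank.get? m).isSome = decide (m ∈ pvPref) := by
  have : ∀ m, m = "Current-only" ∨ m = "Naive pooling" ∨ m = "Fixed lambda=0.50" ∨
      m = "Power prior(lambda=0.50)" ∨ m = "Commensurate prior(tau=1.00)" ∨
      m = "Robust MAP(epsilon=0.20)" ∨ m = "DRO-opt" ∨ m ∉ pvPref := by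
    intro m; by_cases h : m ∈ pvPref
    · simp [pvPref] at h; tauto
    · tauto
  rcases this m with h | h | h | h | h | h | h | h <;>
    first
    | (subst h; decide)
    | (simp [pvPref] at h
       simp only [pvRank, pvPref]
       simp [PySem.Dict.get?, PySem.List.enumerate, PySem.Dict.insert, PySem.Dict.empty,
             h, eq_comm (b := m)])

lemma pv_a_val (mo : List String) :
    select_focus_methods mo = pvPref.filter (fun m => decide (m ∈ mo)) := by
  unfold select_focus_methods
  apply pv_fold_id
  by_cases h : "DRO-opt" ∈ mo
  · left; simp [h]
  · right; exact h

theorem select_focus_methods_spec_aux (mo : List String) :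
    select_focus_methods mo = select_focus_methods_alt mo := by
  rw [pv_a_val]
  have halt : select_focus_methods_alt mo =
      PySem.List.sorted ((PySem.Set.ofList mo).filter (fun m => (pvRank.get? m).isSome))
        (fun m => pvRank.getD m 0) false := rfl
  rw [halt]
  symm
  apply PySem.List.sorted_eq_of_perm_of_pairwise_lt
  · -- perm: both are nodup lists with the same membership
    rw [List.perm_ext_iff_of_nodup]
    · intro m
      simp only [List.mem_filter, PySem.Set.mem_ofList, pv_rank_isSome]
      simp [and_comm]
    · exact List.Nodup.filter _ (by decide)
    · exact List.Nodup.filter _ (PySem.Set.nodup_ofList mo)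
  · -- the filtered preferred list is strictly increasing under the rank key
    have hp : pvPref.Pairwise
        (fun a b => (pvRank.getD a 0) < (pvRank.getD b 0)) := by decide
    exact hp.sublist List.filter_sublist

-- ===== VERDICT (by name: the statement is the Claim_ definition above) =====
theorem select_focus_methods_spec : Claim_equal_select_focus_methods := by
  intro mo _
  exact select_focus_methods_spec_aux mo
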